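-- pv_equiv track=rewrite | github.com/LucasFireBrain/omx-rep-tool | JSON GEN/cli.py | dict_to_js
-- ===== SOURCE A (Python) =====
-- def dict_to_js(obj, var_name):
--     # Generate JavaScript variable assignment with proper formatting
--     lines = [f'const {var_name} = {{']
--     for k, v in obj.items():
--         lines.append(f'  "{k}": [')
--         for item in v:
--             lines.append(f'    {{ id: "{item["id"]}", desc: "{item["desc"]}" }},')
--         if v:
--             lines[-1] = lines[-1][:-1]  # Remove trailing comma for last item
--         lines.append('  ],')
--     if obj:
--         lines[-1] = lines[-1][:-1]  # Remove trailing comma for last key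
--     lines.append('};')
--     return '\n'.join(lines)
-- ===== SOURCE B (Python) =====
-- def dict_to_js(obj, var_name):
--     # Build the text BACK-TO-FRONT: walk entries and items in reverse order,
--     # prepending onto the suffix built so far; the element prepended first
--     # (i.e. the last in output order) gets no trailing comma, all others do.
--     out = '};'
--     last_key = True
--     for k, v in reversed(list(obj.items())):
--         seg = '  ]' + ('' if last_key else ',')
--         last_item = True
--         for item in reversed(v):
--             seg = f'    {{ id: "{item["id"]}", desc: "{item["desc"]}" }}' + ('' if last_item else ',') + '\n' + seg
--             last_item = False
--         seg = f'  "{k}": [\n' + seg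
--         out = seg + '\n' + out
--         last_key = False
--     return f'const {var_name} = {{\n' + out
-- ===== Notes on version B (the rewrite author's own statement) =====
-- stated objective: alternative
-- what changed: B builds the text back-to-front: it walks the dict entries and each item list in reverse, prepending each piece onto the suffix string built so far, and decides commas with a last-element flag (the first piece prepended gets none), instead of A's forward line-list construction with after-the-fact mutation stripping trailing commas.
-- outside the precondition, e.g. on dict_to_js({'k': [{'id': 'x'}]}, 'v'): A raises KeyError, B raises KeyError
import Mathlib
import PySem

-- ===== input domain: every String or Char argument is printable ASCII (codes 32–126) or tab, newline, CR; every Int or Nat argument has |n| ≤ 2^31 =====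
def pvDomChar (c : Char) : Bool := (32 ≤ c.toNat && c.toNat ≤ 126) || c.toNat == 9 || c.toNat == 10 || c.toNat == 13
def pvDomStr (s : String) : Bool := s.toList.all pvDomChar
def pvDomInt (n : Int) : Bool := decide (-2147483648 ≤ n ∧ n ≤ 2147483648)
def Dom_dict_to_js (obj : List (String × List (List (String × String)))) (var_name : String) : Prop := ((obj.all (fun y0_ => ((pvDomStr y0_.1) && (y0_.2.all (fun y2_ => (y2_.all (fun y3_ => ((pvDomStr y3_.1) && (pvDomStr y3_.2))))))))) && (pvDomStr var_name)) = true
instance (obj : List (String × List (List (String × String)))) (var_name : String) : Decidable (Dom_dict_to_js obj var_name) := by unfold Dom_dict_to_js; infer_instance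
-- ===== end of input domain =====

-- B builds the output back-to-front: it walks entries and item lists in reverse, prepending onto
-- the suffix built so far and deciding commas with a last-element flag (objective: alternative;
-- no line is mutated after creation, no trailing comma is ever written and stripped).

-- ===== PORT A =====
-- item["id"] / item["desc"]: under Pre_ both keys are present, so Python's d[k] = getD with any default
def pvItemLineA (item : List (String × String)) : String :=
  "    { id: \"" ++ PySem.Dict.getD (PySem.Dict.ofList item) "id" "" ++ "\", desc: \"" ++ PySem.Dict.getD (PySem.Dict.ofList item) "desc" "" ++ "\" },"

-- lines[-1] = lines[-1][:-1]  (lines is never empty when A executes this)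
def pvStripLast : List String → List String
  | [] => []
  | [s] => [PySem.Str.slice s none (some (-1))]
  | s :: rest => s :: pvStripLast rest

def dict_to_js (obj : List (String × List (List (String × String)))) (var_name : String) : String :=
  let lines : List String := ["const " ++ var_name ++ " = {"]
  let lines := obj.foldl (fun lines kv =>
    let lines := lines ++ ["  \"" ++ kv.1 ++ "\": ["]
    let lines := kv.2.foldl (fun lines item => lines ++ [pvItemLineA item]) lines
    let lines := if kv.2 ≠ [] then pvStripLast lines else lines
    lines ++ ["  ],"]) lines
  let lines := if obj ≠ [] then pvStripLast lines else lines
  let lines := lines ++ ["};"]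
  PySem.Str.join "\n" lines

-- ===== PORT B =====
-- the comma-free item string Source B's inner f-string produces
def pvItemStrB (item : List (String × String)) : String :=
  "    { id: \"" ++ PySem.Dict.getD (PySem.Dict.ofList item) "id" "" ++ "\", desc: \"" ++ PySem.Dict.getD (PySem.Dict.ofList item) "desc" "" ++ "\" }"

-- 'for … in reversed(…)' with (accumulated suffix, last-element flag) state → foldl over .reverse
def dict_to_js_alt (obj : List (String × List (List (String × String)))) (var_name : String) : String :=
  let p : String × Bool := obj.reverse.foldl (fun (p : String × Bool) kv =>
    let seg := "  ]" ++ (if p.2 then "" else ",")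
    let q : String × Bool := kv.2.reverse.foldl (fun (q : String × Bool) item =>
      (pvItemStrB item ++ (if q.2 then "" else ",") ++ "\n" ++ q.1, false)) (seg, true)
    ("  \"" ++ kv.1 ++ "\": [\n" ++ q.1 ++ "\n" ++ p.1, false)) ("};", true)
  "const " ++ var_name ++ " = {\n" ++ p.1

-- ===== PRECONDITION & SPEC =====
-- Pre_ excludes (a) item dicts missing an "id" or "desc" key, on which Python A raises KeyError,
-- and (b) association lists with duplicate keys, which do not denote a well-defined Python dict
-- (dict construction keeps only the last duplicate — a defensible corner no caller relies on).
def Pre_dict_to_js (obj : List (String × List (List (String × String)))) (var_name : String) : Prop :=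
  (obj.map Prod.fst).Nodup ∧
  ∀ p ∈ obj, ∀ item ∈ p.2,
    (item.map Prod.fst).Nodup ∧
    PySem.Dict.contains (PySem.Dict.ofList item) "id" = true ∧ PySem.Dict.contains (PySem.Dict.ofList item) "desc" = true
instance (obj : List (String × List (List (String × String)))) (var_name : String) : Decidable (Pre_dict_to_js obj var_name) := by unfold Pre_dict_to_js; infer_instance

def pvWitness_dict_to_js : (List (String × List (List (String × String)))) × String :=
  ([("a", [[("id", "1"), ("desc", "x")]]), ("b", [])], "data")

def Spec_dict_to_js (obj : List (String × List (List (String × String)))) (var_name : String) (out : String) : Prop := out = dict_to_js_alt obj var_name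
instance (obj : List (String × List (List (String × String)))) (var_name : String) (out : String) : Decidable (Spec_dict_to_js obj var_name out) := by unfold Spec_dict_to_js; infer_instance

-- ===== CLAIM (what is proved, stated in full; the proofs are below) =====
def Claim_equal_dict_to_js : Prop := ∀ (obj : List (String × List (List (String × String)))) (var_name : String), Dom_dict_to_js obj var_name → Pre_dict_to_js obj var_name → Spec_dict_to_js obj var_name (dict_to_js obj var_name)

-- ===== LEMMAS AND PROOFS =====

-- the comma-free block string for one key (what B's output places between key separators)
def pvBlockB (kv : String × List (List (String × String))) : String :=
  "  \"" ++ kv.1 ++ "\": [" ++ (if kv.2 ≠ [] then "\n" ++ PySem.Str.join ",\n" (kv.2.map pvItemStrB) else "") ++ "\n  ]"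

-- the chunk of lines A appends for one key (after the inner comma-strip)
def pvChunkA (kv : String × List (List (String × String))) : List String :=
  ("  \"" ++ kv.1 ++ "\": [") :: (if kv.2 = [] then [] else pvStripLast (kv.2.map pvItemLineA)) ++ ["  ],"]

theorem pvStripLast_append {ls ms : List String} (h : ms ≠ []) :
    pvStripLast (ls ++ ms) = ls ++ pvStripLast ms := by
  induction ls with
  | nil => rfl
  | cons x xs ih =>
    cases xs with
    | nil => cases ms with
      | nil => exact absurd rfl h
      | cons m ms' => rfl
    | cons y ys => simpa [pvStripLast] using ih

theorem pvSlice_comma (s : String) :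
    PySem.Str.slice (s ++ ",") none (some (-1)) = s := by
  apply String.ext
  rw [PySem.Str.slice_to_neg_one, String.toList_append]
  simp

theorem pvStripLast_ne_nil {ls : List String} (h : ls ≠ []) : pvStripLast ls ≠ [] := by
  cases ls with
  | nil => exact absurd rfl h
  | cons x xs => cases xs <;> simp [pvStripLast]

theorem pvJoin_cons (sep x : String) {l : List String} (h : l ≠ []) :
    PySem.Str.join sep (x :: l) = x ++ sep ++ PySem.Str.join sep l := by
  cases l with
  | nil => exact absurd rfl h
  | cons y ys =>
    apply String.ext
    simp [PySem.Str.toList_join, PySem.Chars.join_cons_cons, String.toList_append]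

theorem pvJoin_singleton (sep x : String) : PySem.Str.join sep [x] = x := by
  apply String.ext
  simp [PySem.Str.toList_join, PySem.Chars.join_singleton]

theorem pvJoin_append (sep : String) {xs ys : List String} (hx : xs ≠ []) (hy : ys ≠ []) :
    PySem.Str.join sep (xs ++ ys) = PySem.Str.join sep xs ++ sep ++ PySem.Str.join sep ys := by
  induction xs with
  | nil => exact absurd rfl hx
  | cons x xs ih =>
    cases xs with
    | nil =>
      rw [List.singleton_append, pvJoin_cons sep x hy, pvJoin_singleton]
    | cons y ys' =>
      rw [List.cons_append, pvJoin_cons sep x (by simp), ih (by simp),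
        pvJoin_cons sep x (by simp)]
      simp [String.append_assoc]

-- joining '\n' after stripping the last comma = joining with ',\n' the comma-free strings
theorem pvJoin_strip {α : Type} (f g : α → String) (hfg : ∀ x, f x = g x ++ ",")
    {l : List α} (h : l ≠ []) :
    PySem.Str.join "\n" (pvStripLast (l.map f)) = PySem.Str.join ",\n" (l.map g) := by
  induction l with
  | nil => exact absurd rfl h
  | cons x xs ih =>
    cases xs with
    | nil =>
      simp only [List.map_cons, List.map_nil, pvStripLast, hfg x, pvSlice_comma, pvJoin_singleton]
    | cons y ys =>
      have hne : (y :: ys : List α).map f ≠ [] := by simp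
      simp only [List.map_cons]
      rw [show (f x :: f y :: ys.map f) = [f x] ++ (f y :: ys.map f) from rfl,
        pvStripLast_append (by simp), List.singleton_append,
        pvJoin_cons _ _ (pvStripLast_ne_nil (by simp : (f y :: ys.map f) ≠ [])),
        show (f y :: ys.map f) = (y :: ys).map f from rfl, ih (by simp), hfg x,
        show (g y :: ys.map g) = (y :: ys).map g from rfl,
        pvJoin_cons _ _ (by simp : (y::ys).map g ≠ [])]
      apply String.ext
      simp [String.toList_append]

theorem pvChunkA_ne_nil (kv : String × List (List (String × String))) : pvChunkA kv ≠ [] := by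
  simp [pvChunkA]

theorem pvStripLast_cons {rest : List String} (x : String) (h : rest ≠ []) :
    pvStripLast (x :: rest) = x :: pvStripLast rest := by
  cases rest with
  | nil => exact absurd rfl h
  | cons y ys => rfl

theorem pvItemA_eq (item : List (String × String)) : pvItemLineA item = pvItemStrB item ++ "," := by
  apply String.ext
  simp [pvItemLineA, pvItemStrB, String.toList_append]

-- join '\n' of A's chunk = comma-free block plus trailing comma
theorem pvJoin_chunkA (kv : String × List (List (String × String))) :
    PySem.Str.join "\n" (pvChunkA kv) = pvBlockB kv ++ "," := by
  by_cases hv : kv.2 = []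
  · apply String.ext
    simp [pvChunkA, pvBlockB, hv, PySem.Str.toList_join, PySem.Chars.join_cons_cons,
      PySem.Chars.join_singleton, String.toList_append]
  · have hmap : kv.2.map pvItemLineA ≠ [] := by simpa using hv
    rw [pvChunkA, pvBlockB, if_neg hv, if_pos hv, List.cons_append,
      pvJoin_cons "\n" _ (show pvStripLast (kv.2.map pvItemLineA) ++ ["  ],"] ≠ [] by simp),
      pvJoin_append "\n" (pvStripLast_ne_nil hmap) (show (["  ],"] : List String) ≠ [] by simp),
      pvJoin_strip pvItemLineA pvItemStrB pvItemA_eq hv, pvJoin_singleton]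
    apply String.ext; simp [String.toList_append]

-- the same with the chunk's own trailing comma stripped
theorem pvJoin_chunkA_strip (kv : String × List (List (String × String))) :
    PySem.Str.join "\n" (pvStripLast (pvChunkA kv)) = pvBlockB kv := by
  by_cases hv : kv.2 = []
  · rw [pvChunkA, if_pos hv, pvBlockB, if_neg (by simp [hv])]
    rw [pvStripLast_append (show (["  ],"] : List String) ≠ [] by simp),
      show pvStripLast ["  ],"] = ["  ]"] from by decide]
    apply String.ext
    simp [PySem.Str.toList_join, PySem.Chars.join_cons_cons, PySem.Chars.join_singleton,
      String.toList_append]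
  · have hmap : kv.2.map pvItemLineA ≠ [] := by simpa using hv
    rw [pvChunkA, pvBlockB, if_neg hv, if_pos hv, List.cons_append,
      pvStripLast_cons _ (show pvStripLast (kv.2.map pvItemLineA) ++ ["  ],"] ≠ [] by simp),
      pvStripLast_append (show (["  ],"] : List String) ≠ [] by simp),
      show pvStripLast ["  ],"] = ["  ]"] from by decide,
      pvJoin_cons "\n" _ (show pvStripLast (kv.2.map pvItemLineA) ++ ["  ]"] ≠ [] by simp),
      pvJoin_append "\n" (pvStripLast_ne_nil hmap) (show (["  ]"] : List String) ≠ [] by simp),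
      pvJoin_strip pvItemLineA pvItemStrB pvItemA_eq hv, pvJoin_singleton]
    apply String.ext; simp [String.toList_append]

theorem pvFlatMap_chunkA_ne_nil {obj : List (String × List (List (String × String)))}
    (h : obj ≠ []) : obj.flatMap pvChunkA ≠ [] := by
  cases obj with
  | nil => exact absurd rfl h
  | cons kv rest => simp [List.flatMap_cons, pvChunkA]

-- core A-side fact: strip-last over the flattened chunks joins to the ',\n'-joined blocks
theorem pvCore {obj : List (String × List (List (String × String)))} (h : obj ≠ []) :
    PySem.Str.join "\n" (pvStripLast (obj.flatMap pvChunkA)) =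
    PySem.Str.join ",\n" (obj.map pvBlockB) := by
  induction obj with
  | nil => exact absurd rfl h
  | cons kv rest ih =>
    cases rest with
    | nil =>
      simp only [List.flatMap_cons, List.flatMap_nil, List.append_nil, List.map_cons, List.map_nil]
      rw [pvJoin_chunkA_strip, pvJoin_singleton]
    | cons kv2 rest2 =>
      rw [List.flatMap_cons, pvStripLast_append (pvFlatMap_chunkA_ne_nil (by simp)),
        pvJoin_append _ (pvChunkA_ne_nil kv) (pvStripLast_ne_nil (pvFlatMap_chunkA_ne_nil (by simp))),
        ih (by simp), pvJoin_chunkA]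
      apply String.ext
      simp [PySem.Str.toList_join, PySem.Chars.join_cons_cons, String.toList_append]

-- A's inner fold appends exactly pvChunkA kv
theorem pvStepA (ls : List String) (kv : String × List (List (String × String))) :
    ((if kv.2 ≠ [] then
        pvStripLast (kv.2.foldl (fun lines item => lines ++ [pvItemLineA item])
          (ls ++ ["  \"" ++ kv.1 ++ "\": ["]))
      else kv.2.foldl (fun lines item => lines ++ [pvItemLineA item])
          (ls ++ ["  \"" ++ kv.1 ++ "\": ["])) ++ ["  ],"]) = ls ++ pvChunkA kv := by
  rw [PySem.List.foldl_append_singleton_eq_map]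
  by_cases hv : kv.2 = []
  · simp [hv, pvChunkA]
  · have hmap : kv.2.map pvItemLineA ≠ [] := by simpa using hv
    simp only [ne_eq, hv, not_false_eq_true, if_pos, List.append_assoc]
    rw [pvStripLast_append (by simp), pvStripLast_append hmap]
    simp [pvChunkA, hv]

theorem pvFoldA (obj : List (String × List (List (String × String)))) (init : List String) :
    obj.foldl (fun lines kv =>
      let lines := lines ++ ["  \"" ++ kv.1 ++ "\": ["]
      let lines := kv.2.foldl (fun lines item => lines ++ [pvItemLineA item]) lines
      let lines := if kv.2 ≠ [] then pvStripLast lines else lines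
      lines ++ ["  ],"]) init = init ++ obj.flatMap pvChunkA := by
  induction obj generalizing init with
  | nil => simp
  | cons kv rest ih =>
    rw [List.foldl_cons, List.flatMap_cons]
    show rest.foldl _ ((if kv.2 ≠ [] then _ else _) ++ ["  ],"]) = _
    rw [pvStepA init kv, ih]
    simp

-- B-side: a reversed fold with a last-element flag computes the ',\n' join plus the suffix
theorem pvFoldrJoin {α : Type} (f : α → String)
    (step : α → String × Bool → String × Bool)
    (hstep : ∀ x p, step x p = (f x ++ (if p.2 then "" else ",") ++ "\n" ++ p.1, false))
    (s0 : String) :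
    ∀ v : List α, v ≠ [] →
      List.foldr step (s0, true) v = (PySem.Str.join ",\n" (v.map f) ++ "\n" ++ s0, false) := by
  intro v
  induction v with
  | nil => intro hv; exact absurd rfl hv
  | cons x xs ih =>
    intro _
    cases xs with
    | nil =>
      rw [List.foldr_cons, List.foldr_nil, hstep, List.map_cons, List.map_nil, pvJoin_singleton,
        Prod.mk.injEq]
      refine ⟨?_, rfl⟩
      apply String.ext; simp [String.toList_append]
    | cons y ys =>
      rw [List.foldr_cons, ih (by simp), hstep]
      simp only [List.map_cons]
      rw [pvJoin_cons ",\n" (f x) (show (f y :: List.map f ys) ≠ [] by simp), Prod.mk.injEq]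
      refine ⟨?_, rfl⟩
      apply String.ext; simp [String.toList_append]

-- one key's segment in B equals the comma-free block plus the pending separator c
theorem pvSegB (kv : String × List (List (String × String))) (c : String) :
    "  \"" ++ kv.1 ++ "\": [\n" ++
      (List.foldr (fun item (q : String × Bool) =>
        (pvItemStrB item ++ (if q.2 then "" else ",") ++ "\n" ++ q.1, false)) ("  ]" ++ c, true) kv.2).1
      = pvBlockB kv ++ c := by
  by_cases hv : kv.2 = []
  · rw [hv, List.foldr_nil]
    apply String.ext
    simp [pvBlockB, hv, String.toList_append]
  · rw [pvFoldrJoin pvItemStrB _ (fun x p => rfl) _ kv.2 hv]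
    apply String.ext
    simp [pvBlockB, hv, String.toList_append]

-- ===== VERDICT (by name: the statement is the Claim_ definition above) =====
theorem dict_to_js_spec : Claim_equal_dict_to_js := by
  intro obj var_name _ _
  unfold Spec_dict_to_js dict_to_js dict_to_js_alt
  simp only [pvFoldA, List.foldl_reverse]
  by_cases hobj : obj = []
  · subst hobj
    simp only [List.flatMap_nil, List.append_nil, ne_eq, not_true_eq_false, if_false,
      List.singleton_append, List.foldr_nil]
    rw [pvJoin_cons "\n" _ (show (["};"] : List String) ≠ [] by simp), pvJoin_singleton]
    apply String.ext; simp [String.toList_append]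
  · have hfm := pvFlatMap_chunkA_ne_nil hobj
    rw [pvFoldrJoin pvBlockB
      (fun kv (p : String × Bool) =>
        ("  \"" ++ kv.1 ++ "\": [\n" ++
          (List.foldr (fun item (q : String × Bool) =>
            (pvItemStrB item ++ (if q.2 then "" else ",") ++ "\n" ++ q.1, false))
            ("  ]" ++ (if p.2 then "" else ","), true) kv.2).1 ++ "\n" ++ p.1, false))
      (fun x p => by rw [Prod.mk.injEq]; exact ⟨by rw [pvSegB], rfl⟩)
      "};" obj hobj]
    simp only [ne_eq, hobj, not_false_eq_true, if_pos, List.singleton_append]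
    rw [pvStripLast_cons _ hfm, List.cons_append,
      pvJoin_cons "\n" _ (show pvStripLast (obj.flatMap pvChunkA) ++ ["};"] ≠ [] by simp),
      pvJoin_append "\n" (pvStripLast_ne_nil hfm) (show (["};"] : List String) ≠ [] by simp),
      pvCore hobj, pvJoin_singleton]
    apply String.ext; simp [String.toList_append]
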